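-- pv_equiv track=rewrite | github.com/ALDeig/wb-card-exchange | app/src/services/wb/url.py | _get_basket_url
-- ===== SOURCE A (Python) =====
-- def _get_basket_url(val: int) -> str:
--     """Возвращает версию basket для загрузки фотографии."""
--     baskets = {
--         (0, 144): "01",
--         (144, 288): "02",
--         (288, 432): "03",
--         (432, 720): "04",
--         (720, 1008): "05",
--         (1008, 1062): "06",
--         (1062, 1116): "07",
--         (1116, 1170): "08",
--         (1170, 1314): "09",
--         (1314, 1602): "10",
--         (1602, 1656): "11",
--         (1656, 1920): "12",
--         (1920, 2046): "13",
--         (2046, 2189): "14",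
--     }
--     for range_, basket in baskets.items():
--         if val in range(*range_):
--             return f"basket-{basket}"
--     return "basket-15"
-- ===== SOURCE B (Python) =====
-- _STARTS = [0, 144, 288, 432, 720, 1008, 1062, 1116, 1170, 1314, 1602, 1656, 1920, 2046, 2189]
-- _LABELS = ["01", "02", "03", "04", "05", "06", "07", "08", "09", "10", "11", "12", "13", "14"]
--
--
-- def _get_basket_url(val: int) -> str:
--     """Binary search (bisect_right) over the sorted range start points."""
--     lo, hi = 0, len(_STARTS)
--     while lo < hi:
--         mid = (lo + hi) // 2
--         if val < _STARTS[mid]: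
--             hi = mid
--         else:
--             lo = mid + 1
--     if 1 <= lo <= 14:
--         return f"basket-{_LABELS[lo - 1]}"
--     return "basket-15"
-- ===== Notes on version B (the rewrite author's own statement) =====
-- stated objective: alternative
-- what changed: Replaces A's linear scan over a dict of 14 (start, stop) ranges with a hand-written bisect_right binary search over the sorted boundary list plus a parallel label table.
import Mathlib
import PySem

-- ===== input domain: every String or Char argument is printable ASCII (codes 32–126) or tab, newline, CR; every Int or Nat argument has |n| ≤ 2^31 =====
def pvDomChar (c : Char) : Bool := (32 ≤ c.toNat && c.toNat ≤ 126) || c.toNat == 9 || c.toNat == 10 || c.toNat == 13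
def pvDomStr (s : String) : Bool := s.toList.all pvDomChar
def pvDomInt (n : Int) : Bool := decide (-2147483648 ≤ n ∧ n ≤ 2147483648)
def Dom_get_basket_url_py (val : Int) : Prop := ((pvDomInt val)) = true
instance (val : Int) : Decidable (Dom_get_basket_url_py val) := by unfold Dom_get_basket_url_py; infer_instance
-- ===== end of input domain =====

-- B replaces A's linear scan over 14 (start, stop) ranges by a binary search (a
-- hand-written bisect_right) over the sorted boundary list; same values everywhere (objective: idiomatic/alternative).

-- ===== PORT A =====
-- A's dict of ranges, in insertion order.
def basketsA : List ((Int × Int) × String) :=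
  [((0, 144), "01"), ((144, 288), "02"), ((288, 432), "03"), ((432, 720), "04"),
   ((720, 1008), "05"), ((1008, 1062), "06"), ((1062, 1116), "07"), ((1116, 1170), "08"),
   ((1170, 1314), "09"), ((1314, 1602), "10"), ((1602, 1656), "11"), ((1656, 1920), "12"),
   ((1920, 2046), "13"), ((2046, 2189), "14")]

-- the for-loop with early return; `val in range(a, b)` for an int val is exactly a ≤ val < b.
def scanA (v : Int) : List ((Int × Int) × String) → String
  | [] => "basket-15"
  | ((a, b), s) :: rest => if a ≤ v ∧ v < b then "basket-" ++ s else scanA v rest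

def get_basket_url_py (val : Int) : String := scanA val basketsA

-- ===== PORT B =====
def startsB : List Int := [0, 144, 288, 432, 720, 1008, 1062, 1116, 1170, 1314, 1602, 1656, 1920, 2046, 2189]
def labelsB : List String := ["01", "02", "03", "04", "05", "06", "07", "08", "09", "10", "11", "12", "13", "14"]

-- Source B's while-loop; the extra Nat is fuel = hi - lo at the call (the loop body shrinks
-- hi - lo each iteration, so fuel never runs out); indices stay in range, so getD is exact.
def bisectLoop (x : Int) : Nat → Nat → Nat → Nat
  | 0, lo, _ => lo
  | f + 1, lo, hi =>
    if lo < hi then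
      let mid := (lo + hi) / 2
      if x < startsB.getD mid 0 then bisectLoop x f lo mid else bisectLoop x f (mid + 1) hi
    else lo

def get_basket_url_py_alt (val : Int) : String :=
  let pos := bisectLoop val startsB.length 0 startsB.length
  if 1 ≤ pos ∧ pos ≤ 14 then "basket-" ++ labelsB.getD (pos - 1) "" else "basket-15"

-- ===== PRECONDITION & SPEC =====
def Spec_get_basket_url_py (val : Int) (out : String) : Prop := out = get_basket_url_py_alt val
instance (val : Int) (out : String) : Decidable (Spec_get_basket_url_py val out) := by unfold Spec_get_basket_url_py; infer_instance

-- ===== CLAIM (what is proved, stated in full; the proofs are below) =====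
def Claim_equal_get_basket_url_py : Prop := ∀ (val : Int), Dom_get_basket_url_py val → Spec_get_basket_url_py val (get_basket_url_py val)

-- ===== LEMMAS AND PROOFS =====
theorem bisect_step (x : Int) (f lo hi : Nat) (h : lo < hi) :
    bisectLoop x (f + 1) lo hi =
      if x < startsB.getD ((lo + hi) / 2) 0 then bisectLoop x f lo ((lo + hi) / 2)
      else bisectLoop x f ((lo + hi) / 2 + 1) hi := by
  simp [bisectLoop, h]

theorem bisect_stop (x : Int) (f lo hi : Nat) (h : ¬ lo < hi) :
    bisectLoop x (f + 1) lo hi = lo := by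
  simp [bisectLoop, h]

theorem case_0 (val : Int) (h2 : val < 0) : get_basket_url_py val = get_basket_url_py_alt val := by
  have hA : get_basket_url_py val = "basket-15" := by
    simp only [get_basket_url_py, basketsA, scanA]
    rw [if_neg (by omega)]
    rw [if_neg (by omega)]
    rw [if_neg (by omega)]
    rw [if_neg (by omega)]
    rw [if_neg (by omega)]
    rw [if_neg (by omega)]
    rw [if_neg (by omega)]
    rw [if_neg (by omega)]
    rw [if_neg (by omega)]
    rw [if_neg (by omega)]
    rw [if_neg (by omega)]
    rw [if_neg (by omega)]
    rw [if_neg (by omega)]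
    rw [if_neg (by omega)]
  have hB : bisectLoop val 15 0 15 = 0 := by
    rw [bisect_step val 14 0 15 (by norm_num)]
    norm_num [startsB]
    rw [if_pos (by omega)]
    rw [bisect_step val 13 0 7 (by norm_num)]
    norm_num [startsB]
    rw [if_pos (by omega)]
    rw [bisect_step val 12 0 3 (by norm_num)]
    norm_num [startsB]
    rw [if_pos (by omega)]
    rw [bisect_step val 11 0 1 (by norm_num)]
    norm_num [startsB]
    rw [if_pos (by omega)]
    rw [bisect_stop val 10 0 0 (by norm_num)]
  have hAlt : get_basket_url_py_alt val = "basket-15" := by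
    simp only [get_basket_url_py_alt, startsB, labelsB, List.length]
    rw [hB]
    norm_num
  rw [hA, hAlt]

theorem case_1 (val : Int) (h1 : 0 ≤ val) (h2 : val < 144) : get_basket_url_py val = get_basket_url_py_alt val := by
  have hA : get_basket_url_py val = "basket-01" := by
    simp only [get_basket_url_py, basketsA, scanA]
    rw [if_pos (by omega)]
    rfl
  have hB : bisectLoop val 15 0 15 = 1 := by
    rw [bisect_step val 14 0 15 (by norm_num)]
    norm_num [startsB]
    rw [if_pos (by omega)]
    rw [bisect_step val 13 0 7 (by norm_num)]
    norm_num [startsB]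
    rw [if_pos (by omega)]
    rw [bisect_step val 12 0 3 (by norm_num)]
    norm_num [startsB]
    rw [if_pos (by omega)]
    rw [bisect_step val 11 0 1 (by norm_num)]
    norm_num [startsB]
    rw [if_neg (by omega)]
    rw [bisect_stop val 10 1 1 (by norm_num)]
  have hAlt : get_basket_url_py_alt val = "basket-01" := by
    simp only [get_basket_url_py_alt, startsB, labelsB, List.length]
    rw [hB]
    norm_num
    rfl
  rw [hA, hAlt]

theorem case_2 (val : Int) (h1 : 144 ≤ val) (h2 : val < 288) : get_basket_url_py val = get_basket_url_py_alt val := by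
  have hA : get_basket_url_py val = "basket-02" := by
    simp only [get_basket_url_py, basketsA, scanA]
    rw [if_neg (by omega)]
    rw [if_pos (by omega)]
    rfl
  have hB : bisectLoop val 15 0 15 = 2 := by
    rw [bisect_step val 14 0 15 (by norm_num)]
    norm_num [startsB]
    rw [if_pos (by omega)]
    rw [bisect_step val 13 0 7 (by norm_num)]
    norm_num [startsB]
    rw [if_pos (by omega)]
    rw [bisect_step val 12 0 3 (by norm_num)]
    norm_num [startsB]
    rw [if_neg (by omega)]
    rw [bisect_step val 11 2 3 (by norm_num)]
    norm_num [startsB]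
    rw [if_pos (by omega)]
    rw [bisect_stop val 10 2 2 (by norm_num)]
  have hAlt : get_basket_url_py_alt val = "basket-02" := by
    simp only [get_basket_url_py_alt, startsB, labelsB, List.length]
    rw [hB]
    norm_num
    rfl
  rw [hA, hAlt]

theorem case_3 (val : Int) (h1 : 288 ≤ val) (h2 : val < 432) : get_basket_url_py val = get_basket_url_py_alt val := by
  have hA : get_basket_url_py val = "basket-03" := by
    simp only [get_basket_url_py, basketsA, scanA]
    rw [if_neg (by omega)]
    rw [if_neg (by omega)]
    rw [if_pos (by omega)]
    rfl
  have hB : bisectLoop val 15 0 15 = 3 := by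
    rw [bisect_step val 14 0 15 (by norm_num)]
    norm_num [startsB]
    rw [if_pos (by omega)]
    rw [bisect_step val 13 0 7 (by norm_num)]
    norm_num [startsB]
    rw [if_pos (by omega)]
    rw [bisect_step val 12 0 3 (by norm_num)]
    norm_num [startsB]
    rw [if_neg (by omega)]
    rw [bisect_step val 11 2 3 (by norm_num)]
    norm_num [startsB]
    rw [if_neg (by omega)]
    rw [bisect_stop val 10 3 3 (by norm_num)]
  have hAlt : get_basket_url_py_alt val = "basket-03" := by
    simp only [get_basket_url_py_alt, startsB, labelsB, List.length]
    rw [hB]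
    norm_num
    rfl
  rw [hA, hAlt]

theorem case_4 (val : Int) (h1 : 432 ≤ val) (h2 : val < 720) : get_basket_url_py val = get_basket_url_py_alt val := by
  have hA : get_basket_url_py val = "basket-04" := by
    simp only [get_basket_url_py, basketsA, scanA]
    rw [if_neg (by omega)]
    rw [if_neg (by omega)]
    rw [if_neg (by omega)]
    rw [if_pos (by omega)]
    rfl
  have hB : bisectLoop val 15 0 15 = 4 := by
    rw [bisect_step val 14 0 15 (by norm_num)]
    norm_num [startsB]
    rw [if_pos (by omega)]
    rw [bisect_step val 13 0 7 (by norm_num)]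
    norm_num [startsB]
    rw [if_neg (by omega)]
    rw [bisect_step val 12 4 7 (by norm_num)]
    norm_num [startsB]
    rw [if_pos (by omega)]
    rw [bisect_step val 11 4 5 (by norm_num)]
    norm_num [startsB]
    rw [if_pos (by omega)]
    rw [bisect_stop val 10 4 4 (by norm_num)]
  have hAlt : get_basket_url_py_alt val = "basket-04" := by
    simp only [get_basket_url_py_alt, startsB, labelsB, List.length]
    rw [hB]
    norm_num
    rfl
  rw [hA, hAlt]

theorem case_5 (val : Int) (h1 : 720 ≤ val) (h2 : val < 1008) : get_basket_url_py val = get_basket_url_py_alt val := by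
  have hA : get_basket_url_py val = "basket-05" := by
    simp only [get_basket_url_py, basketsA, scanA]
    rw [if_neg (by omega)]
    rw [if_neg (by omega)]
    rw [if_neg (by omega)]
    rw [if_neg (by omega)]
    rw [if_pos (by omega)]
    rfl
  have hB : bisectLoop val 15 0 15 = 5 := by
    rw [bisect_step val 14 0 15 (by norm_num)]
    norm_num [startsB]
    rw [if_pos (by omega)]
    rw [bisect_step val 13 0 7 (by norm_num)]
    norm_num [startsB]
    rw [if_neg (by omega)]
    rw [bisect_step val 12 4 7 (by norm_num)]
    norm_num [startsB]
    rw [if_pos (by omega)]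
    rw [bisect_step val 11 4 5 (by norm_num)]
    norm_num [startsB]
    rw [if_neg (by omega)]
    rw [bisect_stop val 10 5 5 (by norm_num)]
  have hAlt : get_basket_url_py_alt val = "basket-05" := by
    simp only [get_basket_url_py_alt, startsB, labelsB, List.length]
    rw [hB]
    norm_num
    rfl
  rw [hA, hAlt]

theorem case_6 (val : Int) (h1 : 1008 ≤ val) (h2 : val < 1062) : get_basket_url_py val = get_basket_url_py_alt val := by
  have hA : get_basket_url_py val = "basket-06" := by
    simp only [get_basket_url_py, basketsA, scanA]
    rw [if_neg (by omega)]
    rw [if_neg (by omega)]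
    rw [if_neg (by omega)]
    rw [if_neg (by omega)]
    rw [if_neg (by omega)]
    rw [if_pos (by omega)]
    rfl
  have hB : bisectLoop val 15 0 15 = 6 := by
    rw [bisect_step val 14 0 15 (by norm_num)]
    norm_num [startsB]
    rw [if_pos (by omega)]
    rw [bisect_step val 13 0 7 (by norm_num)]
    norm_num [startsB]
    rw [if_neg (by omega)]
    rw [bisect_step val 12 4 7 (by norm_num)]
    norm_num [startsB]
    rw [if_neg (by omega)]
    rw [bisect_step val 11 6 7 (by norm_num)]
    norm_num [startsB]
    rw [if_pos (by omega)]
    rw [bisect_stop val 10 6 6 (by norm_num)]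
  have hAlt : get_basket_url_py_alt val = "basket-06" := by
    simp only [get_basket_url_py_alt, startsB, labelsB, List.length]
    rw [hB]
    norm_num
    rfl
  rw [hA, hAlt]

theorem case_7 (val : Int) (h1 : 1062 ≤ val) (h2 : val < 1116) : get_basket_url_py val = get_basket_url_py_alt val := by
  have hA : get_basket_url_py val = "basket-07" := by
    simp only [get_basket_url_py, basketsA, scanA]
    rw [if_neg (by omega)]
    rw [if_neg (by omega)]
    rw [if_neg (by omega)]
    rw [if_neg (by omega)]
    rw [if_neg (by omega)]
    rw [if_neg (by omega)]
    rw [if_pos (by omega)]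
    rfl
  have hB : bisectLoop val 15 0 15 = 7 := by
    rw [bisect_step val 14 0 15 (by norm_num)]
    norm_num [startsB]
    rw [if_pos (by omega)]
    rw [bisect_step val 13 0 7 (by norm_num)]
    norm_num [startsB]
    rw [if_neg (by omega)]
    rw [bisect_step val 12 4 7 (by norm_num)]
    norm_num [startsB]
    rw [if_neg (by omega)]
    rw [bisect_step val 11 6 7 (by norm_num)]
    norm_num [startsB]
    rw [if_neg (by omega)]
    rw [bisect_stop val 10 7 7 (by norm_num)]
  have hAlt : get_basket_url_py_alt val = "basket-07" := by
    simp only [get_basket_url_py_alt, startsB, labelsB, List.length]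
    rw [hB]
    norm_num
    rfl
  rw [hA, hAlt]

theorem case_8 (val : Int) (h1 : 1116 ≤ val) (h2 : val < 1170) : get_basket_url_py val = get_basket_url_py_alt val := by
  have hA : get_basket_url_py val = "basket-08" := by
    simp only [get_basket_url_py, basketsA, scanA]
    rw [if_neg (by omega)]
    rw [if_neg (by omega)]
    rw [if_neg (by omega)]
    rw [if_neg (by omega)]
    rw [if_neg (by omega)]
    rw [if_neg (by omega)]
    rw [if_neg (by omega)]
    rw [if_pos (by omega)]
    rfl
  have hB : bisectLoop val 15 0 15 = 8 := by
    rw [bisect_step val 14 0 15 (by norm_num)]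
    norm_num [startsB]
    rw [if_neg (by omega)]
    rw [bisect_step val 13 8 15 (by norm_num)]
    norm_num [startsB]
    rw [if_pos (by omega)]
    rw [bisect_step val 12 8 11 (by norm_num)]
    norm_num [startsB]
    rw [if_pos (by omega)]
    rw [bisect_step val 11 8 9 (by norm_num)]
    norm_num [startsB]
    rw [if_pos (by omega)]
    rw [bisect_stop val 10 8 8 (by norm_num)]
  have hAlt : get_basket_url_py_alt val = "basket-08" := by
    simp only [get_basket_url_py_alt, startsB, labelsB, List.length]
    rw [hB]
    norm_num
    rfl
  rw [hA, hAlt]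

theorem case_9 (val : Int) (h1 : 1170 ≤ val) (h2 : val < 1314) : get_basket_url_py val = get_basket_url_py_alt val := by
  have hA : get_basket_url_py val = "basket-09" := by
    simp only [get_basket_url_py, basketsA, scanA]
    rw [if_neg (by omega)]
    rw [if_neg (by omega)]
    rw [if_neg (by omega)]
    rw [if_neg (by omega)]
    rw [if_neg (by omega)]
    rw [if_neg (by omega)]
    rw [if_neg (by omega)]
    rw [if_neg (by omega)]
    rw [if_pos (by omega)]
    rfl
  have hB : bisectLoop val 15 0 15 = 9 := by
    rw [bisect_step val 14 0 15 (by norm_num)]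
    norm_num [startsB]
    rw [if_neg (by omega)]
    rw [bisect_step val 13 8 15 (by norm_num)]
    norm_num [startsB]
    rw [if_pos (by omega)]
    rw [bisect_step val 12 8 11 (by norm_num)]
    norm_num [startsB]
    rw [if_pos (by omega)]
    rw [bisect_step val 11 8 9 (by norm_num)]
    norm_num [startsB]
    rw [if_neg (by omega)]
    rw [bisect_stop val 10 9 9 (by norm_num)]
  have hAlt : get_basket_url_py_alt val = "basket-09" := by
    simp only [get_basket_url_py_alt, startsB, labelsB, List.length]
    rw [hB]
    norm_num
    rfl
  rw [hA, hAlt]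

theorem case_10 (val : Int) (h1 : 1314 ≤ val) (h2 : val < 1602) : get_basket_url_py val = get_basket_url_py_alt val := by
  have hA : get_basket_url_py val = "basket-10" := by
    simp only [get_basket_url_py, basketsA, scanA]
    rw [if_neg (by omega)]
    rw [if_neg (by omega)]
    rw [if_neg (by omega)]
    rw [if_neg (by omega)]
    rw [if_neg (by omega)]
    rw [if_neg (by omega)]
    rw [if_neg (by omega)]
    rw [if_neg (by omega)]
    rw [if_neg (by omega)]
    rw [if_pos (by omega)]
    rfl
  have hB : bisectLoop val 15 0 15 = 10 := by
    rw [bisect_step val 14 0 15 (by norm_num)]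
    norm_num [startsB]
    rw [if_neg (by omega)]
    rw [bisect_step val 13 8 15 (by norm_num)]
    norm_num [startsB]
    rw [if_pos (by omega)]
    rw [bisect_step val 12 8 11 (by norm_num)]
    norm_num [startsB]
    rw [if_neg (by omega)]
    rw [bisect_step val 11 10 11 (by norm_num)]
    norm_num [startsB]
    rw [if_pos (by omega)]
    rw [bisect_stop val 10 10 10 (by norm_num)]
  have hAlt : get_basket_url_py_alt val = "basket-10" := by
    simp only [get_basket_url_py_alt, startsB, labelsB, List.length]
    rw [hB]
    norm_num
    rfl
  rw [hA, hAlt]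

theorem case_11 (val : Int) (h1 : 1602 ≤ val) (h2 : val < 1656) : get_basket_url_py val = get_basket_url_py_alt val := by
  have hA : get_basket_url_py val = "basket-11" := by
    simp only [get_basket_url_py, basketsA, scanA]
    rw [if_neg (by omega)]
    rw [if_neg (by omega)]
    rw [if_neg (by omega)]
    rw [if_neg (by omega)]
    rw [if_neg (by omega)]
    rw [if_neg (by omega)]
    rw [if_neg (by omega)]
    rw [if_neg (by omega)]
    rw [if_neg (by omega)]
    rw [if_neg (by omega)]
    rw [if_pos (by omega)]
    rfl
  have hB : bisectLoop val 15 0 15 = 11 := by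
    rw [bisect_step val 14 0 15 (by norm_num)]
    norm_num [startsB]
    rw [if_neg (by omega)]
    rw [bisect_step val 13 8 15 (by norm_num)]
    norm_num [startsB]
    rw [if_pos (by omega)]
    rw [bisect_step val 12 8 11 (by norm_num)]
    norm_num [startsB]
    rw [if_neg (by omega)]
    rw [bisect_step val 11 10 11 (by norm_num)]
    norm_num [startsB]
    rw [if_neg (by omega)]
    rw [bisect_stop val 10 11 11 (by norm_num)]
  have hAlt : get_basket_url_py_alt val = "basket-11" := by
    simp only [get_basket_url_py_alt, startsB, labelsB, List.length]
    rw [hB]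
    norm_num
    rfl
  rw [hA, hAlt]

theorem case_12 (val : Int) (h1 : 1656 ≤ val) (h2 : val < 1920) : get_basket_url_py val = get_basket_url_py_alt val := by
  have hA : get_basket_url_py val = "basket-12" := by
    simp only [get_basket_url_py, basketsA, scanA]
    rw [if_neg (by omega)]
    rw [if_neg (by omega)]
    rw [if_neg (by omega)]
    rw [if_neg (by omega)]
    rw [if_neg (by omega)]
    rw [if_neg (by omega)]
    rw [if_neg (by omega)]
    rw [if_neg (by omega)]
    rw [if_neg (by omega)]
    rw [if_neg (by omega)]
    rw [if_neg (by omega)]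
    rw [if_pos (by omega)]
    rfl
  have hB : bisectLoop val 15 0 15 = 12 := by
    rw [bisect_step val 14 0 15 (by norm_num)]
    norm_num [startsB]
    rw [if_neg (by omega)]
    rw [bisect_step val 13 8 15 (by norm_num)]
    norm_num [startsB]
    rw [if_neg (by omega)]
    rw [bisect_step val 12 12 15 (by norm_num)]
    norm_num [startsB]
    rw [if_pos (by omega)]
    rw [bisect_step val 11 12 13 (by norm_num)]
    norm_num [startsB]
    rw [if_pos (by omega)]
    rw [bisect_stop val 10 12 12 (by norm_num)]
  have hAlt : get_basket_url_py_alt val = "basket-12" := by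
    simp only [get_basket_url_py_alt, startsB, labelsB, List.length]
    rw [hB]
    norm_num
    rfl
  rw [hA, hAlt]

theorem case_13 (val : Int) (h1 : 1920 ≤ val) (h2 : val < 2046) : get_basket_url_py val = get_basket_url_py_alt val := by
  have hA : get_basket_url_py val = "basket-13" := by
    simp only [get_basket_url_py, basketsA, scanA]
    rw [if_neg (by omega)]
    rw [if_neg (by omega)]
    rw [if_neg (by omega)]
    rw [if_neg (by omega)]
    rw [if_neg (by omega)]
    rw [if_neg (by omega)]
    rw [if_neg (by omega)]
    rw [if_neg (by omega)]
    rw [if_neg (by omega)]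
    rw [if_neg (by omega)]
    rw [if_neg (by omega)]
    rw [if_neg (by omega)]
    rw [if_pos (by omega)]
    rfl
  have hB : bisectLoop val 15 0 15 = 13 := by
    rw [bisect_step val 14 0 15 (by norm_num)]
    norm_num [startsB]
    rw [if_neg (by omega)]
    rw [bisect_step val 13 8 15 (by norm_num)]
    norm_num [startsB]
    rw [if_neg (by omega)]
    rw [bisect_step val 12 12 15 (by norm_num)]
    norm_num [startsB]
    rw [if_pos (by omega)]
    rw [bisect_step val 11 12 13 (by norm_num)]
    norm_num [startsB]
    rw [if_neg (by omega)]
    rw [bisect_stop val 10 13 13 (by norm_num)]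
  have hAlt : get_basket_url_py_alt val = "basket-13" := by
    simp only [get_basket_url_py_alt, startsB, labelsB, List.length]
    rw [hB]
    norm_num
    rfl
  rw [hA, hAlt]

theorem case_14 (val : Int) (h1 : 2046 ≤ val) (h2 : val < 2189) : get_basket_url_py val = get_basket_url_py_alt val := by
  have hA : get_basket_url_py val = "basket-14" := by
    simp only [get_basket_url_py, basketsA, scanA]
    rw [if_neg (by omega)]
    rw [if_neg (by omega)]
    rw [if_neg (by omega)]
    rw [if_neg (by omega)]
    rw [if_neg (by omega)]
    rw [if_neg (by omega)]
    rw [if_neg (by omega)]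
    rw [if_neg (by omega)]
    rw [if_neg (by omega)]
    rw [if_neg (by omega)]
    rw [if_neg (by omega)]
    rw [if_neg (by omega)]
    rw [if_neg (by omega)]
    rw [if_pos (by omega)]
    rfl
  have hB : bisectLoop val 15 0 15 = 14 := by
    rw [bisect_step val 14 0 15 (by norm_num)]
    norm_num [startsB]
    rw [if_neg (by omega)]
    rw [bisect_step val 13 8 15 (by norm_num)]
    norm_num [startsB]
    rw [if_neg (by omega)]
    rw [bisect_step val 12 12 15 (by norm_num)]
    norm_num [startsB]
    rw [if_neg (by omega)]
    rw [bisect_step val 11 14 15 (by norm_num)]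
    norm_num [startsB]
    rw [if_pos (by omega)]
    rw [bisect_stop val 10 14 14 (by norm_num)]
  have hAlt : get_basket_url_py_alt val = "basket-14" := by
    simp only [get_basket_url_py_alt, startsB, labelsB, List.length]
    rw [hB]
    norm_num
    rfl
  rw [hA, hAlt]

theorem case_15 (val : Int) (h1 : 2189 ≤ val) : get_basket_url_py val = get_basket_url_py_alt val := by
  have hA : get_basket_url_py val = "basket-15" := by
    simp only [get_basket_url_py, basketsA, scanA]
    rw [if_neg (by omega)]
    rw [if_neg (by omega)]
    rw [if_neg (by omega)]
    rw [if_neg (by omega)]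
    rw [if_neg (by omega)]
    rw [if_neg (by omega)]
    rw [if_neg (by omega)]
    rw [if_neg (by omega)]
    rw [if_neg (by omega)]
    rw [if_neg (by omega)]
    rw [if_neg (by omega)]
    rw [if_neg (by omega)]
    rw [if_neg (by omega)]
    rw [if_neg (by omega)]
  have hB : bisectLoop val 15 0 15 = 15 := by
    rw [bisect_step val 14 0 15 (by norm_num)]
    norm_num [startsB]
    rw [if_neg (by omega)]
    rw [bisect_step val 13 8 15 (by norm_num)]
    norm_num [startsB]
    rw [if_neg (by omega)]
    rw [bisect_step val 12 12 15 (by norm_num)]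
    norm_num [startsB]
    rw [if_neg (by omega)]
    rw [bisect_step val 11 14 15 (by norm_num)]
    norm_num [startsB]
    rw [if_neg (by omega)]
    rw [bisect_stop val 10 15 15 (by norm_num)]
  have hAlt : get_basket_url_py_alt val = "basket-15" := by
    simp only [get_basket_url_py_alt, startsB, labelsB, List.length]
    rw [hB]
    norm_num
  rw [hA, hAlt]

theorem get_basket_url_eq (val : Int) : get_basket_url_py val = get_basket_url_py_alt val := by
  by_cases h0 : val < 0
  · exact case_0 val h0
  by_cases h1 : val < 144
  · exact case_1 val (by omega) h1
  by_cases h2 : val < 288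
  · exact case_2 val (by omega) h2
  by_cases h3 : val < 432
  · exact case_3 val (by omega) h3
  by_cases h4 : val < 720
  · exact case_4 val (by omega) h4
  by_cases h5 : val < 1008
  · exact case_5 val (by omega) h5
  by_cases h6 : val < 1062
  · exact case_6 val (by omega) h6
  by_cases h7 : val < 1116
  · exact case_7 val (by omega) h7
  by_cases h8 : val < 1170
  · exact case_8 val (by omega) h8
  by_cases h9 : val < 1314
  · exact case_9 val (by omega) h9
  by_cases h10 : val < 1602
  · exact case_10 val (by omega) h10
  by_cases h11 : val < 1656
  · exact case_11 val (by omega) h11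
  by_cases h12 : val < 1920
  · exact case_12 val (by omega) h12
  by_cases h13 : val < 2046
  · exact case_13 val (by omega) h13
  by_cases h14 : val < 2189
  · exact case_14 val (by omega) h14
  exact case_15 val (by omega)

-- ===== VERDICT (by name: the statement is the Claim_ definition above) =====
theorem get_basket_url_py_spec : Claim_equal_get_basket_url_py := by
  intro val _
  exact get_basket_url_eq val
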